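-- pv_equiv track=rewrite | github.com/manav9503/poc-project | streamlit_app.py | ai_router
-- ===== SOURCE A (Python) =====
-- from typing import TypedDict, Annotated
--
-- class GraphState(TypedDict):
--     user_input: str
--     result: Annotated[str, "replace"]
--     next: str
--     category: str
--
-- def ai_router(state: GraphState):
--     text = state["user_input"].lower()
--     if any(k in text for k in ["who is", "what is", "where is", "question"]):
--         next_node = "qa"
--     elif "translate" in text:
--         next_node = "translate"
--     elif "summarize" in text or "summary" in text:
--         next_node = "summary"
--     elif "sentiment" in text:
--         next_node = "sentiment"
--     else:
--         next_node = "conversation"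
--     return {"next": next_node}
-- ===== SOURCE B (Python) =====
-- _KEYWORDS = [
--     ("who is", "qa"), ("what is", "qa"), ("where is", "qa"), ("question", "qa"),
--     ("translate", "translate"),
--     ("summarize", "summary"), ("summary", "summary"),
--     ("sentiment", "sentiment"),
-- ]
-- _PRIORITY = ["qa", "translate", "summary", "sentiment"]
--
-- def ai_router(state):
--     text = state["user_input"].lower()
--     matched = set()
--     for i in range(len(text)):
--         for kw, node in _KEYWORDS:
--             if text.startswith(kw, i):
--                 matched.add(node)
--     for node in _PRIORITY:
--         if node in matched:
--             return {"next": node}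
--     return {"next": "conversation"}
-- ===== Notes on version B (the rewrite author's own statement) =====
-- stated objective: alternative
-- what changed: Instead of A's if/elif chain of per-keyword substring tests, B makes one scan over the text positions, collecting at each index every category whose keyword starts there into a set, and then picks the highest-priority matched category.
import Mathlib
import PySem

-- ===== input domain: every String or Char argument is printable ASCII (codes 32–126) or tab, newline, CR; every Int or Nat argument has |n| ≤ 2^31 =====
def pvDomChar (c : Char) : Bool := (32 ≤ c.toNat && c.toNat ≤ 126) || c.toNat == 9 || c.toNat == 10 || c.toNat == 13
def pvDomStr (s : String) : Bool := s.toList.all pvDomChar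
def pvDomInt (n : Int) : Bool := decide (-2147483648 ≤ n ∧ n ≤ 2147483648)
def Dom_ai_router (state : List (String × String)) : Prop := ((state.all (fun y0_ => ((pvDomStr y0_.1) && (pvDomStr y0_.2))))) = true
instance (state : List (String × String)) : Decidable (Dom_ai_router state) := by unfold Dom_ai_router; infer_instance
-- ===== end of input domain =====

-- B replaces A's if/elif per-keyword substring tests by one scan over text positions collecting all matched categories in a set, then a priority pick; return-value equivalence proved on states containing "user_input".


-- ===== PORT A =====
-- state["user_input"] raises KeyError when absent: the none case ([]) is unreachable under Pre_ai_router.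
def ai_router (state : List (String × String)) : List (String × String) :=
  match (PySem.Dict.mk state).get? "user_input" with
  | none => []
  | some ui =>
    let text := PySem.Str.lower ui
    let next_node :=
      if ["who is", "what is", "where is", "question"].any (fun k => PySem.Str.isIn k text) then "qa"
      else if PySem.Str.isIn "translate" text then "translate"
      else if PySem.Str.isIn "summarize" text || PySem.Str.isIn "summary" text then "summary"
      else if PySem.Str.isIn "sentiment" text then "sentiment"
      else "conversation"
    [("next", next_node)]

-- ===== PORT B =====
def pvKeywords : List (String × String) :=
  [("who is", "qa"), ("what is", "qa"), ("where is", "qa"), ("question", "qa"),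
   ("translate", "translate"),
   ("summarize", "summary"), ("summary", "summary"),
   ("sentiment", "sentiment")]

def pvPriority : List String := ["qa", "translate", "summary", "sentiment"]

-- the double loop 'for i in range(len(text)): for kw, node in _KEYWORDS: if text.startswith(kw, i): matched.add(node)'.
-- text.startswith(kw, i) is exactly Chars.startswith (chars.drop i) kw.toList for 0 ≤ i < len(text) (no clamping needed there).
def pvMatched (chars : List Char) : PySem.Set String :=
  (List.range chars.length).foldl
    (fun acc i =>
      pvKeywords.foldl
        (fun a p => if PySem.Chars.startswith (chars.drop i) p.1.toList then PySem.Set.add a p.2 else a)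
        acc)
    PySem.Set.empty

-- the final loop 'for node in _PRIORITY: if node in matched: return {"next": node}'
def pvPick : List String → PySem.Set String → String
  | [], _ => "conversation"
  | n :: rest, m => if PySem.Set.contains m n then n else pvPick rest m

def ai_router_alt (state : List (String × String)) : List (String × String) :=
  match (PySem.Dict.mk state).get? "user_input" with
  | none => []
  | some ui => [("next", pvPick pvPriority (pvMatched (PySem.Str.lower ui).toList))]

-- ===== PRECONDITION & SPEC =====
-- A raises KeyError (and B does the same) when the state has no "user_input" key; Pre_ excludes exactly those.
def Pre_ai_router (state : List (String × String)) : Prop :=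
  "user_input" ∈ state.map Prod.fst
instance (state : List (String × String)) : Decidable (Pre_ai_router state) := by unfold Pre_ai_router; infer_instance
def pvWitness_ai_router : (List (String × String)) := [("user_input", "who is Ada?")]
def Spec_ai_router (state : List (String × String)) (out : List (String × String)) : Prop := out = ai_router_alt state
instance (state : List (String × String)) (out : List (String × String)) : Decidable (Spec_ai_router state out) := by unfold Spec_ai_router; infer_instance

-- ===== CLAIM =====
def Claim_equal_ai_router : Prop := ∀ (state : List (String × String)), Dom_ai_router state → Pre_ai_router state → Spec_ai_router state (ai_router state)

-- ===== LEMMAS AND PROOFS =====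

-- membership in the inner keyword loop's accumulator
theorem pv_mem_inner (chars : List Char) (i : Nat) (ks : List (String × String))
    (acc : PySem.Set String) (x : String) :
    x ∈ ks.foldl
        (fun a p => if PySem.Chars.startswith (chars.drop i) p.1.toList then PySem.Set.add a p.2 else a)
        acc ↔
      x ∈ acc ∨ ∃ p ∈ ks, PySem.Chars.startswith (chars.drop i) p.1.toList = true ∧ p.2 = x := by
  induction ks generalizing acc with
  | nil => simp
  | cons hd tl ih =>
    simp only [List.foldl_cons]
    rw [ih]
    by_cases h : PySem.Chars.startswith (chars.drop i) hd.1.toList = true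
    · rw [if_pos h]
      simp only [PySem.Set.mem_add]
      constructor
      · rintro ((hm | he) | ⟨p, hp, hs, hx⟩)
        · exact .inl hm
        · exact .inr ⟨hd, by simp, h, he.symm⟩
        · exact .inr ⟨p, List.mem_cons_of_mem _ hp, hs, hx⟩
      · rintro (hm | ⟨p, hp, hs, hx⟩)
        · exact .inl (.inl hm)
        · rcases List.mem_cons.mp hp with rfl | hp'
          · exact .inl (.inr hx.symm)
          · exact .inr ⟨p, hp', hs, hx⟩
    · rw [if_neg h]
      constructor
      · rintro (hm | ⟨p, hp, hs, hx⟩)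
        · exact .inl hm
        · exact .inr ⟨p, List.mem_cons_of_mem _ hp, hs, hx⟩
      · rintro (hm | ⟨p, hp, hs, hx⟩)
        · exact .inl hm
        · rcases List.mem_cons.mp hp with rfl | hp'
          · exact absurd hs h
          · exact .inr ⟨p, hp', hs, hx⟩

-- membership in the outer position loop's accumulator
theorem pv_mem_outer (chars : List Char) (idxs : List Nat) (acc : PySem.Set String) (x : String) :
    x ∈ idxs.foldl
        (fun acc i =>
          pvKeywords.foldl
            (fun a p => if PySem.Chars.startswith (chars.drop i) p.1.toList then PySem.Set.add a p.2 else a)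
            acc)
        acc ↔
      x ∈ acc ∨ ∃ i ∈ idxs, ∃ p ∈ pvKeywords,
        PySem.Chars.startswith (chars.drop i) p.1.toList = true ∧ p.2 = x := by
  induction idxs generalizing acc with
  | nil => simp
  | cons hd tl ih =>
    simp only [List.foldl_cons]
    rw [ih, pv_mem_inner]
    constructor
    · rintro ((hm | ⟨p, hp, hs, hx⟩) | ⟨i, hi, hrest⟩)
      · exact .inl hm
      · exact .inr ⟨hd, by simp, p, hp, hs, hx⟩
      · exact .inr ⟨i, List.mem_cons_of_mem _ hi, hrest⟩
    · rintro (hm | ⟨i, hi, hrest⟩)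
      · exact .inl (.inl hm)
      · rcases List.mem_cons.mp hi with rfl | hi'
        · exact .inl (.inr hrest)
        · exact .inr ⟨i, hi', hrest⟩

theorem pv_mem_matched (chars : List Char) (x : String) :
    x ∈ pvMatched chars ↔
      ∃ i < chars.length, ∃ p ∈ pvKeywords,
        PySem.Chars.startswith (chars.drop i) p.1.toList = true ∧ p.2 = x := by
  unfold pvMatched
  rw [pv_mem_outer]
  simp [List.mem_range, PySem.Set.empty]

-- a nonempty keyword starts at some position < length iff it is a substring
theorem pv_exists_pos_iff_isIn (chars kw : List Char) (hk : kw ≠ []) :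
    (∃ i < chars.length, PySem.Chars.startswith (chars.drop i) kw = true) ↔
      PySem.Chars.isIn kw chars = true := by
  constructor
  · rintro ⟨i, _, h⟩
    rw [PySem.Chars.startswith_iff] at h
    exact (PySem.Chars.exists_prefix_drop_iff_isIn _ _).mp ⟨i, h⟩
  · intro h
    obtain ⟨j, hj⟩ := (PySem.Chars.exists_prefix_drop_iff_isIn _ _).mpr h
    refine ⟨j, ?_, (PySem.Chars.startswith_iff _ _).mpr hj⟩
    by_contra hlen
    push_neg at hlen
    rw [List.drop_eq_nil_of_le hlen, List.prefix_nil] at hj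
    exact hk hj

-- node-level characterisation of the matched set, one lemma per category (RHS in A's bracketing)
theorem pv_contains_qa (chars : List Char) :
    PySem.Set.contains (pvMatched chars) "qa" =
      (PySem.Chars.isIn "who is".toList chars || (PySem.Chars.isIn "what is".toList chars ||
       (PySem.Chars.isIn "where is".toList chars || PySem.Chars.isIn "question".toList chars))) := by
  rw [Bool.eq_iff_iff, PySem.Set.contains_iff, pv_mem_matched]
  simp only [Bool.or_eq_true]
  rw [← pv_exists_pos_iff_isIn chars "who is".toList (by decide),
      ← pv_exists_pos_iff_isIn chars "what is".toList (by decide),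
      ← pv_exists_pos_iff_isIn chars "where is".toList (by decide),
      ← pv_exists_pos_iff_isIn chars "question".toList (by decide)]
  constructor
  · rintro ⟨i, hi, p, hp, hs, hx⟩
    simp only [pvKeywords, List.mem_cons, List.not_mem_nil, or_false] at hp
    rcases hp with rfl | rfl | rfl | rfl | rfl | rfl | rfl | rfl
    · exact .inl ⟨i, hi, hs⟩
    · exact .inr (.inl ⟨i, hi, hs⟩)
    · exact .inr (.inr (.inl ⟨i, hi, hs⟩))
    · exact .inr (.inr (.inr ⟨i, hi, hs⟩))
    · exact absurd hx (by decide)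
    · exact absurd hx (by decide)
    · exact absurd hx (by decide)
    · exact absurd hx (by decide)
  · rintro (⟨i, hi, hs⟩ | ⟨i, hi, hs⟩ | ⟨i, hi, hs⟩ | ⟨i, hi, hs⟩)
    · exact ⟨i, hi, ("who is", "qa"), by simp [pvKeywords], hs, rfl⟩
    · exact ⟨i, hi, ("what is", "qa"), by simp [pvKeywords], hs, rfl⟩
    · exact ⟨i, hi, ("where is", "qa"), by simp [pvKeywords], hs, rfl⟩
    · exact ⟨i, hi, ("question", "qa"), by simp [pvKeywords], hs, rfl⟩

theorem pv_contains_translate (chars : List Char) :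
    PySem.Set.contains (pvMatched chars) "translate" =
      PySem.Chars.isIn "translate".toList chars := by
  rw [Bool.eq_iff_iff, PySem.Set.contains_iff, pv_mem_matched,
      ← pv_exists_pos_iff_isIn chars "translate".toList (by decide)]
  constructor
  · rintro ⟨i, hi, p, hp, hs, hx⟩
    simp only [pvKeywords, List.mem_cons, List.not_mem_nil, or_false] at hp
    rcases hp with rfl | rfl | rfl | rfl | rfl | rfl | rfl | rfl
    · exact absurd hx (by decide)
    · exact absurd hx (by decide)
    · exact absurd hx (by decide)
    · exact absurd hx (by decide)
    · exact ⟨i, hi, hs⟩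
    · exact absurd hx (by decide)
    · exact absurd hx (by decide)
    · exact absurd hx (by decide)
  · rintro ⟨i, hi, hs⟩
    exact ⟨i, hi, ("translate", "translate"), by simp [pvKeywords], hs, rfl⟩

theorem pv_contains_summary (chars : List Char) :
    PySem.Set.contains (pvMatched chars) "summary" =
      (PySem.Chars.isIn "summarize".toList chars || PySem.Chars.isIn "summary".toList chars) := by
  rw [Bool.eq_iff_iff, PySem.Set.contains_iff, pv_mem_matched]
  simp only [Bool.or_eq_true]
  rw [← pv_exists_pos_iff_isIn chars "summarize".toList (by decide),
      ← pv_exists_pos_iff_isIn chars "summary".toList (by decide)]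
  constructor
  · rintro ⟨i, hi, p, hp, hs, hx⟩
    simp only [pvKeywords, List.mem_cons, List.not_mem_nil, or_false] at hp
    rcases hp with rfl | rfl | rfl | rfl | rfl | rfl | rfl | rfl
    · exact absurd hx (by decide)
    · exact absurd hx (by decide)
    · exact absurd hx (by decide)
    · exact absurd hx (by decide)
    · exact absurd hx (by decide)
    · exact .inl ⟨i, hi, hs⟩
    · exact .inr ⟨i, hi, hs⟩
    · exact absurd hx (by decide)
  · rintro (⟨i, hi, hs⟩ | ⟨i, hi, hs⟩)
    · exact ⟨i, hi, ("summarize", "summary"), by simp [pvKeywords], hs, rfl⟩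
    · exact ⟨i, hi, ("summary", "summary"), by simp [pvKeywords], hs, rfl⟩

theorem pv_contains_sentiment (chars : List Char) :
    PySem.Set.contains (pvMatched chars) "sentiment" =
      PySem.Chars.isIn "sentiment".toList chars := by
  rw [Bool.eq_iff_iff, PySem.Set.contains_iff, pv_mem_matched,
      ← pv_exists_pos_iff_isIn chars "sentiment".toList (by decide)]
  constructor
  · rintro ⟨i, hi, p, hp, hs, hx⟩
    simp only [pvKeywords, List.mem_cons, List.not_mem_nil, or_false] at hp
    rcases hp with rfl | rfl | rfl | rfl | rfl | rfl | rfl | rfl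
    · exact absurd hx (by decide)
    · exact absurd hx (by decide)
    · exact absurd hx (by decide)
    · exact absurd hx (by decide)
    · exact absurd hx (by decide)
    · exact absurd hx (by decide)
    · exact absurd hx (by decide)
    · exact ⟨i, hi, hs⟩
  · rintro ⟨i, hi, hs⟩
    exact ⟨i, hi, ("sentiment", "sentiment"), by simp [pvKeywords], hs, rfl⟩

-- ===== VERDICT =====
theorem ai_router_spec : Claim_equal_ai_router := by
  intro state _ _
  unfold Spec_ai_router ai_router ai_router_alt
  cases h : (PySem.Dict.mk state).get? "user_input" with
  | none => rfl
  | some ui =>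
    simp only [pvPriority, pvPick,
      pv_contains_qa, pv_contains_translate, pv_contains_summary, pv_contains_sentiment,
      List.any_cons, List.any_nil, Bool.or_false,
      PySem.Str.isIn_eq]
    rfl
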